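-- pv_equiv track=rewrite | github.com/orbitfold/aoc2024 | day20/part_a/main.py | find_close_points
-- ===== SOURCE A (Python) =====
-- def find_close_points(current, path):
--     possibilities = [current]
--     for _ in range(2):
--         new_possibilities = []
--         for p in possibilities:
--             neighbours = [(p[0] + 1, p[1]), (p[0] - 1, p[1]),
--                           (p[0], p[1] + 1), (p[0], p[1] - 1)]
--             for n in neighbours:
--                 if n not in new_possibilities:
--                     new_possibilities.append(n)
--             possibilities = new_possibilities
--     possibilities = [p for p in possibilities if p in path]
--     return possibilities
-- ===== SOURCE B (Python) =====
-- # Closed-form: the two-step dedup expansion always yields these nine offsets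
-- # in exactly this insertion order, so map them directly and filter by path.
-- _OFFSETS = [(2, 0), (0, 0), (1, 1), (1, -1), (-2, 0), (-1, 1), (-1, -1), (0, 2), (0, -2)]
--
-- def find_close_points(current, path):
--     x, y = current
--     return [(x + dx, y + dy) for dx, dy in _OFFSETS if (x + dx, y + dy) in path]
-- ===== Notes on version B (the rewrite author's own statement) =====
-- stated objective: simpler
-- what changed: Replaces the two-round neighbour expansion with in-list dedup by a single comprehension over the nine closed-form offsets that expansion always produces, in the same insertion order.
import Mathlib
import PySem

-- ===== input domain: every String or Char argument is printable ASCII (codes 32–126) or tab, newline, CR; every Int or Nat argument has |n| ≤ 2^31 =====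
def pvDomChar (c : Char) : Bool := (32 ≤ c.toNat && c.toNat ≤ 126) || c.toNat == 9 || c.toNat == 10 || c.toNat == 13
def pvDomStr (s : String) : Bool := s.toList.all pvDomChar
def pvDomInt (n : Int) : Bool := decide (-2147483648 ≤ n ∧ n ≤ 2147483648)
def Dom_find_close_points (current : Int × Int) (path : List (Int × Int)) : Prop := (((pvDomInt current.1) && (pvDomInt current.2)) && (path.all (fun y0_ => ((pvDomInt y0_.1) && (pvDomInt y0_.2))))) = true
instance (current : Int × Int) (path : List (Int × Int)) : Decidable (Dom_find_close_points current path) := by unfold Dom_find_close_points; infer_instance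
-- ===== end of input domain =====

-- B replaces A's two rounds of neighbour expansion with in-list dedup by the closed-form
-- list of the nine offsets that expansion always produces, in the same insertion order (simpler).

-- ===== PORT A =====
-- append n to acc unless already present (A's "if n not in new_possibilities: append")
def pvIns (acc : List (Int × Int)) (n : Int × Int) : List (Int × Int) :=
  if n ∈ acc then acc else acc ++ [n]

-- A's `neighbours` list for a point p
def pvNbrs (p : Int × Int) : List (Int × Int) :=
  [(p.1 + 1, p.2), (p.1 - 1, p.2), (p.1, p.2 + 1), (p.1, p.2 - 1)]

-- one iteration of A's outer `for _ in range(2)` loop body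
def pvStep (poss : List (Int × Int)) : List (Int × Int) :=
  poss.foldl (fun np p => (pvNbrs p).foldl pvIns np) []

def find_close_points (current : Int × Int) (path : List (Int × Int)) : List (Int × Int) :=
  ((List.range 2).foldl (fun poss _ => pvStep poss) [current]).filter (fun p => p ∈ path)

-- ===== PORT B =====
def pvOffsets : List (Int × Int) :=
  [(2, 0), (0, 0), (1, 1), (1, -1), (-2, 0), (-1, 1), (-1, -1), (0, 2), (0, -2)]

def find_close_points_alt (current : Int × Int) (path : List (Int × Int)) : List (Int × Int) :=
  (pvOffsets.map (fun d => (current.1 + d.1, current.2 + d.2))).filter (fun q => q ∈ path)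

-- ===== PRECONDITION & SPEC =====
def Spec_find_close_points (current : Int × Int) (path : List (Int × Int)) (out : List (Int × Int)) : Prop := out = find_close_points_alt current path
instance (current : Int × Int) (path : List (Int × Int)) (out : List (Int × Int)) : Decidable (Spec_find_close_points current path out) := by unfold Spec_find_close_points; infer_instance

-- ===== CLAIM (what is proved, stated in full; the proofs are below) =====
def Claim_equal_find_close_points : Prop := ∀ (current : Int × Int) (path : List (Int × Int)), Dom_find_close_points current path → Spec_find_close_points current path (find_close_points current path)

-- ===== LEMMAS AND PROOFS =====
def pvShift (t : Int × Int) (p : Int × Int) : Int × Int := (p.1 + t.1, p.2 + t.2)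

lemma pvShift_inj (t : Int × Int) : Function.Injective (pvShift t) := by
  rintro ⟨a1, a2⟩ ⟨b1, b2⟩ h
  simp only [pvShift, Prod.mk.injEq] at h ⊢
  omega

lemma pvShift_mem (t : Int × Int) (l : List (Int × Int)) (n : Int × Int) :
    pvShift t n ∈ l.map (pvShift t) ↔ n ∈ l :=
  List.mem_map_of_injective (pvShift_inj t)

lemma pvIns_shift (t : Int × Int) (acc : List (Int × Int)) (n : Int × Int) :
    pvIns (acc.map (pvShift t)) (pvShift t n) = (pvIns acc n).map (pvShift t) := by
  by_cases h : n ∈ acc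
  · simp [pvIns, h, (pvShift_mem t acc n).2 h]
  · simp [pvIns, h, (pvShift_mem t acc n).not.2 h]

lemma pvNbrs_shift (t p : Int × Int) :
    pvNbrs (pvShift t p) = (pvNbrs p).map (pvShift t) := by
  simp only [pvNbrs, pvShift, List.map_cons, List.map_nil, List.cons.injEq,
    Prod.mk.injEq, and_true, true_and]
  exact ⟨by ring, by ring, by ring, by ring⟩

lemma pvFoldIns_shift (t : Int × Int) (ns : List (Int × Int)) (acc : List (Int × Int)) :
    (ns.map (pvShift t)).foldl pvIns (acc.map (pvShift t)) = (ns.foldl pvIns acc).map (pvShift t) := by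
  induction ns generalizing acc with
  | nil => rfl
  | cons n ns ih => simp only [List.map_cons, List.foldl_cons, pvIns_shift, ih]

lemma pvStepFold_shift (t : Int × Int) (poss acc : List (Int × Int)) :
    (poss.map (pvShift t)).foldl (fun np p => (pvNbrs p).foldl pvIns np) (acc.map (pvShift t))
      = (poss.foldl (fun np p => (pvNbrs p).foldl pvIns np) acc).map (pvShift t) := by
  induction poss generalizing acc with
  | nil => rfl
  | cons p ps ih =>
      simp only [List.map_cons, List.foldl_cons, pvNbrs_shift, pvFoldIns_shift, ih]

lemma pvStep_shift (t : Int × Int) (poss : List (Int × Int)) :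
    pvStep (poss.map (pvShift t)) = (pvStep poss).map (pvShift t) := by
  have h := pvStepFold_shift t poss []
  simpa [pvStep] using h

lemma pvStep_two_zero : pvStep (pvStep [((0 : Int), (0 : Int))]) = pvOffsets := by rfl

lemma pvStep_two (x y : Int) :
    pvStep (pvStep [((x : Int), (y : Int))]) = pvOffsets.map (pvShift (x, y)) := by
  have h0 : [((x : Int), (y : Int))] = [((0 : Int), (0 : Int))].map (pvShift (x, y)) := by
    simp [pvShift]
  rw [h0, pvStep_shift, pvStep_shift, pvStep_two_zero]

-- ===== VERDICT (by name: the statement is the Claim_ definition above) =====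
theorem find_close_points_spec : Claim_equal_find_close_points := by
  rintro ⟨x, y⟩ path _
  unfold Spec_find_close_points find_close_points find_close_points_alt
  have hr : (List.range 2).foldl (fun poss _ => pvStep poss) [((x : Int), (y : Int))]
      = pvStep (pvStep [((x : Int), (y : Int))]) := by
    simp [List.range_succ]
  rw [hr, pvStep_two]
  have hmap : pvOffsets.map (pvShift (x, y)) = pvOffsets.map (fun d => (x + d.1, y + d.2)) :=
    List.map_congr_left (fun d _ => by simp only [pvShift, Prod.mk.injEq]; exact ⟨by ring, by ring⟩)
  rw [hmap]
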